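-- pv_equiv track=rewrite | github.com/sophiegehrels/ComputerScience | true_pairs.py | find_set_duplicates_subset
-- ===== SOURCE A (Python) =====
-- from collections import defaultdict
-- from itertools import combinations
--
-- def find_set_duplicates_subset(list_products, original_indices):
--     # Dictionary to hold the products grouped by their modelID
--     true_duplicates = defaultdict(list)
--
--     # Loop through all products and their original indices, group them by modelID
--     for original_idx, product in zip(original_indices, list_products):
--         true_duplicates[product['modelID']].append(original_idx)
--
--     # Generate true_pairs using the original indices
--     true_pairs = set()
--     for indices in true_duplicates.values():
--         if len(indices) > 1:
--             for pair in combinations(indices, 2):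
--                 true_pairs.add(tuple(sorted(pair)))
--
--     return true_pairs
-- ===== SOURCE B (Python) =====
-- def find_set_duplicates_subset(list_products, original_indices):
--     # Partition-based: repeatedly split off the group of the first remaining
--     # product's modelID (no dict, no combinations), emit its pairs, recurse on the rest.
--     items = list(zip(original_indices, list_products))
--     pairs = []
--     while items:
--         idx0, prod0 = items[0]
--         key = prod0['modelID']
--         rest = items[1:]
--         group = [idx0] + [i for i, p in rest if p['modelID'] == key]
--         items = [(i, p) for i, p in rest if p['modelID'] != key]
--         while len(group) > 1:
--             head, group = group[0], group[1:]
--             for other in group: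
--                 pairs.append((head, other) if head <= other else (other, head))
--     return set(pairs)
-- ===== Notes on version B (the rewrite author's own statement) =====
-- stated objective: alternative
-- what changed: Replaces A's two-phase structure (build a defaultdict of modelID groups, then enumerate itertools.combinations over each completed group into a set) by a dict-free partition loop that repeatedly splits off the entire group of the first remaining product's modelID, emits that group's pairs directly, and continues on the remainder; trades A's hash-map grouping for list partitioning (quadratic in the number of distinct modelIDs).
import Mathlib
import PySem

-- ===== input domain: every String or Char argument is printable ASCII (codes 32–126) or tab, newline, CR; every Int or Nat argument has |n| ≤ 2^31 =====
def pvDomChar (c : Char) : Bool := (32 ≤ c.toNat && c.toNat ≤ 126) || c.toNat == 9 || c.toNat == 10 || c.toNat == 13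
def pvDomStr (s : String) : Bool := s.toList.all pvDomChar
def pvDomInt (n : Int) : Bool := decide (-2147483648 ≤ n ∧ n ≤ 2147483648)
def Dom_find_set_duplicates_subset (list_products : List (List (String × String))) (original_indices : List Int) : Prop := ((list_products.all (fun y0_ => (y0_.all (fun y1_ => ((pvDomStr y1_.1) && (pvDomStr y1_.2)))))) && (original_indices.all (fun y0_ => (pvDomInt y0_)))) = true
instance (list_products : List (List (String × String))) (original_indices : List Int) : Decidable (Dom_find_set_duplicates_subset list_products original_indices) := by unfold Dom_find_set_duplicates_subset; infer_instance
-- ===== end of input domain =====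

-- B replaces A's dict-of-groups + itertools.combinations by a dict-free partition recursion
-- (split off the first remaining modelID's whole group, emit its pairs, recurse); objective: alternative.


-- product['modelID'] for both ports: the Option is none exactly where Python raises KeyError (excluded by Pre_).
def pvKey (p : List (String × String)) : Option String := PySem.Dict.get? (PySem.Dict.mk p) "modelID"

-- ===== PORT A =====
-- itertools.combinations(xs, 2), in itertools order
def pvComb2 : List Int → List (Int × Int)
  | [] => []
  | x :: rest => rest.map (fun y => (x, y)) ++ pvComb2 rest

def find_set_duplicates_subset (list_products : List (List (String × String))) (original_indices : List Int) : List (Int × Int) :=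
  -- for original_idx, product in zip(...): true_duplicates[product['modelID']].append(original_idx)
  let true_duplicates : PySem.Dict (Option String) (List Int) :=
    (original_indices.zip list_products).foldl
      (fun d ip => d.modify (pvKey ip.2) [] (fun l => l ++ [ip.1]))
      (PySem.Dict.mk [])
  -- for indices in values(): if len > 1: for pair in combinations(indices, 2): true_pairs.add(tuple(sorted(pair)))
  true_duplicates.values.foldl
    (fun s indices =>
      if 1 < indices.length then
        (pvComb2 indices).foldl
          (fun s pr => PySem.Set.add s (if pr.1 ≤ pr.2 then (pr.1, pr.2) else (pr.2, pr.1))) s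
      else s)
    []

-- ===== PORT B =====
-- inner while: pop the head of the group, pair it with every later member
def pvPairChain : List Int → List (Int × Int)
  | [] => []
  | head :: group =>
      group.map (fun other => if head ≤ other then (head, other) else (other, head)) ++ pvPairChain group

-- outer while: split off the whole group of the first remaining item's modelID, recurse on the rest
def pvScan : List (Int × List (String × String)) → List (Int × Int)
  | [] => []
  | ip0 :: rest =>
      pvPairChain (ip0.1 :: (rest.filter (fun ip => pvKey ip.2 == pvKey ip0.2)).map (·.1)) ++
        pvScan (rest.filter (fun ip => !(pvKey ip.2 == pvKey ip0.2)))
termination_by items => items.length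
decreasing_by
  refine Nat.lt_succ_of_le ?_
  simpa using List.length_filter_le _ rest.attach

def find_set_duplicates_subset_alt (list_products : List (List (String × String))) (original_indices : List Int) : List (Int × Int) :=
  PySem.Set.ofList (pvScan (original_indices.zip list_products))

-- ===== PRECONDITION & SPEC =====
-- Pre_ excludes exactly the inputs where Python A raises KeyError: some zipped product lacks a 'modelID' key.
def Pre_find_set_duplicates_subset (list_products : List (List (String × String))) (original_indices : List Int) : Prop :=
  ∀ p ∈ list_products.take original_indices.length, (pvKey p).isSome = true
instance (list_products : List (List (String × String))) (original_indices : List Int) : Decidable (Pre_find_set_duplicates_subset list_products original_indices) := by unfold Pre_find_set_duplicates_subset; infer_instance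

def pvWitness_find_set_duplicates_subset : (List (List (String × String))) × List Int :=
  ([[("modelID", "m1")], [("modelID", "m2")], [("modelID", "m1")]], [10, 20, 30])

def Spec_find_set_duplicates_subset (list_products : List (List (String × String))) (original_indices : List Int) (out : List (Int × Int)) : Prop := out = find_set_duplicates_subset_alt list_products original_indices
instance (list_products : List (List (String × String))) (original_indices : List Int) (out : List (Int × Int)) : Decidable (Spec_find_set_duplicates_subset list_products original_indices out) := by unfold Spec_find_set_duplicates_subset; infer_instance

-- ===== CLAIM (what is proved, stated in full; the proofs are below) =====
def Claim_equal_find_set_duplicates_subset : Prop := ∀ (list_products : List (List (String × String))) (original_indices : List Int), Dom_find_set_duplicates_subset list_products original_indices → Pre_find_set_duplicates_subset list_products original_indices → Spec_find_set_duplicates_subset list_products original_indices (find_set_duplicates_subset list_products original_indices)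

-- ===== LEMMAS AND PROOFS =====

theorem pvWitness_ok :
    Dom_find_set_duplicates_subset pvWitness_find_set_duplicates_subset.1 pvWitness_find_set_duplicates_subset.2 ∧
    Pre_find_set_duplicates_subset pvWitness_find_set_duplicates_subset.1 pvWitness_find_set_duplicates_subset.2 := by
  constructor <;> decide

-- canonical grouping: keys in first-occurrence order, each with the values carried by that key
def pvCanon (kitems : List (Option String × Int)) : List (List Int) :=
  (PySem.List.dedup (kitems.map Prod.fst)).map
    (fun k => (kitems.filter (fun p => p.1 == k)).map (fun p => p.2))

def pvKItems (items : List (Int × List (String × String))) : List (Option String × Int) :=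
  items.map (fun ip => (pvKey ip.2, ip.1))

theorem pvPairChain_eq (g : List Int) :
    pvPairChain g = (pvComb2 g).map (fun pr => if pr.1 ≤ pr.2 then (pr.1, pr.2) else (pr.2, pr.1)) := by
  induction g with
  | nil => rfl
  | cons x rest ih => simp [pvPairChain, pvComb2, ih, List.map_map, Function.comp]

theorem foldl_add_cons {α : Type} [BEq α] [LawfulBEq α] (x : α) (s : List α) (l : List α) :
    l.foldl PySem.Set.add (x :: s) = x :: (l.filter (fun y => !(y == x))).foldl PySem.Set.add s := by
  induction l generalizing s with
  | nil => rfl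
  | cons y t ih =>
    by_cases h : y = x
    · subst h
      have hadd : PySem.Set.add (y :: s) y = y :: s := by
        simp [PySem.Set.add, PySem.Set.contains]
      simp [List.foldl_cons, ih]
    · have hne : (y == x) = false := by simp [h]
      have hadd : PySem.Set.add (x :: s) y = x :: PySem.Set.add s y := by
        simp [PySem.Set.add, PySem.Set.contains, hne]
        split <;> rfl
      simp [List.foldl_cons, hne, hadd, ih]

theorem dedup_cons {α : Type} [BEq α] [LawfulBEq α] (x : α) (l : List α) :
    PySem.List.dedup (x :: l) = x :: PySem.List.dedup (l.filter (fun y => !(y == x))) := by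
  have h1 : PySem.List.dedup (x :: l) = l.foldl PySem.Set.add (PySem.Set.add [] x) := by
    simp [PySem.List.dedup_eq_ofList, PySem.Set.ofList_eq_foldl]
  have h2 : PySem.Set.add ([] : List α) x = [x] := rfl
  rw [h1, h2, foldl_add_cons]
  simp [PySem.List.dedup_eq_ofList, PySem.Set.ofList_eq_foldl]

theorem pvScan_eq (items : List (Int × List (String × String))) :
    pvScan items = ((pvCanon (pvKItems items)).map pvPairChain).flatten := by
  generalize hn : items.length = n
  induction n using Nat.strong_induction_on generalizing items with
  | _ n ih =>
    match items, hn with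
    | [], _ =>
      simp [pvScan, pvCanon, pvKItems, PySem.List.dedup_eq_ofList]
    | ip0 :: rest, hn =>
      rw [pvScan]
      have hlt : (rest.filter (fun ip => !(pvKey ip.2 == pvKey ip0.2))).length < n := by
        have := List.length_filter_le (fun ip => !(pvKey ip.2 == pvKey ip0.2)) rest
        simp [List.length_cons] at hn
        omega
      rw [ih _ hlt _ rfl]
      -- unfold the canonical grouping one step
      have hmapfst : ∀ (l : List (Int × List (String × String))),
          (pvKItems l).map Prod.fst = l.map (fun ip => pvKey ip.2) := by
        intro l; simp [pvKItems, List.map_map, Function.comp]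
      have hded : PySem.List.dedup ((pvKItems (ip0 :: rest)).map Prod.fst)
          = pvKey ip0.2 ::
            PySem.List.dedup ((pvKItems (rest.filter (fun ip => !(pvKey ip.2 == pvKey ip0.2)))).map Prod.fst) := by
        rw [hmapfst, hmapfst, List.map_cons, dedup_cons, List.filter_map]
        rfl
      unfold pvCanon
      rw [hded]
      simp only [List.map_cons, List.flatten_cons]
      congr 1
      · -- the split-off group is exactly the first canonical group
        congr 1
        show ip0.1 :: (rest.filter (fun ip => pvKey ip.2 == pvKey ip0.2)).map (·.1)
            = ((pvKItems (ip0 :: rest)).filter (fun p => p.1 == pvKey ip0.2)).map (fun p => p.2)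
        simp only [pvKItems, List.map_cons, List.filter_cons, List.filter_map]
        rw [show ((pvKey ip0.2, ip0.1).1 == pvKey ip0.2) = true by simp]
        simp [Function.comp_def]
      · -- later canonical groups ignore the removed group entirely
        congr 1
        congr 1
        apply List.map_congr_left
        intro k hk
        have hkne : k ≠ pvKey ip0.2 := by
          intro hkey
          subst hkey
          have hmem := (PySem.List.mem_dedup _ _).mp hk
          rw [hmapfst] at hmem
          obtain ⟨ip, hip, hfst⟩ := List.mem_map.mp hmem
          have hcond := (List.mem_filter.mp hip).2
          rw [hfst] at hcond
          simp at hcond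
        congr 1
        simp only [pvKItems, List.filter_map, List.map_cons, List.filter_cons]
        rw [show ((pvKey ip0.2, ip0.1).1 == k) = false by simpa using (Ne.symm hkne)]
        rw [List.filter_filter]
        congr 1
        apply List.filter_congr
        intro ip _
        simp only [Function.comp_apply]
        cases hik : (pvKey ip.2 == k)
        · simp
        · have h1 : pvKey ip.2 = k := by simpa using hik
          have h2 : (pvKey ip.2 == pvKey ip0.2) = false := by
            simp [h1]; exact hkne
          simp [h2]

-- A's dict of groups has exactly the canonical groups as its values
theorem values_eq_canon (items : List (Int × List (String × String))) :
    (items.foldl (fun d ip => d.modify (pvKey ip.2) [] (fun l => l ++ [ip.1])) (PySem.Dict.mk [])).values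
      = pvCanon (pvKItems items) := by
  have hfold : items.foldl (fun d ip => d.modify (pvKey ip.2) [] (fun l => l ++ [ip.1])) (PySem.Dict.mk [])
      = (pvKItems items).foldl (fun d p => d.modify p.1 [] (fun l => l ++ [p.2])) (PySem.Dict.mk []) := by
    rw [pvKItems, List.foldl_map]
  rw [hfold]
  have hnodup : ((pvKItems items).foldl (fun d p => d.modify p.1 [] (fun l => l ++ [p.2])) (PySem.Dict.mk [])).keys.Nodup :=
    PySem.Dict.nodup_keys_foldl_modify_key (pvKItems items) Prod.fst []
      (fun _ p l => l ++ [p.2]) (PySem.Dict.mk []) (by simp [PySem.Dict.keys])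
  have hkeys : ((pvKItems items).foldl (fun d p => d.modify p.1 [] (fun l => l ++ [p.2])) (PySem.Dict.mk [])).keys
      = PySem.Set.update (PySem.Dict.mk ([] : List (Option String × List Int))).keys ((pvKItems items).map Prod.fst) :=
    PySem.Dict.keys_foldl_modify_key (pvKItems items) Prod.fst [] (fun _ p l => l ++ [p.2]) (PySem.Dict.mk [])
  have hupd : PySem.Set.update (PySem.Dict.mk ([] : List (Option String × List Int))).keys ((pvKItems items).map Prod.fst)
      = PySem.List.dedup ((pvKItems items).map Prod.fst) := by
    simp [PySem.List.dedup_eq_ofList, PySem.Set.ofList_eq_foldl, PySem.Set.update, PySem.Dict.keys]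
  rw [PySem.Dict.values_eq_map_keys _ hnodup [], hkeys, hupd]
  unfold pvCanon
  apply List.map_congr_left
  intro k _
  rw [PySem.Dict.getD_foldl_modify_append]
  show (PySem.Dict.mk []).getD k [] ++ _ = _
  rw [show (PySem.Dict.mk ([] : List (Option String × List Int))).getD k [] = [] from rfl]
  simp

-- A's nested set-building folds = Set.ofList of the flattened per-group sorted pairs
theorem A_eq_ofList (list_products : List (List (String × String))) (original_indices : List Int) :
    find_set_duplicates_subset list_products original_indices
      = PySem.Set.ofList (((pvCanon (pvKItems (original_indices.zip list_products))).map pvPairChain).flatten) := by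
  simp only [find_set_duplicates_subset]
  rw [values_eq_canon]
  rw [PySem.Set.ofList_eq_foldl, List.foldl_flatten, List.foldl_map]
  apply PySem.List.foldl_congr_mem _ _ _ _
  intro acc g _
  by_cases h : 1 < g.length
  · rw [if_pos h, pvPairChain_eq, List.foldl_map]
  · rw [if_neg h]
    match g, h with
    | [], _ => rfl
    | [x], _ => rfl
    | x :: y :: t, h => exact absurd (by simp [List.length_cons]) h

-- ===== VERDICT (by name: the statement is the Claim_ definition above) =====
theorem find_set_duplicates_subset_spec : Claim_equal_find_set_duplicates_subset := by
  intro list_products original_indices _hdom _hpre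
  show find_set_duplicates_subset list_products original_indices = find_set_duplicates_subset_alt list_products original_indices
  rw [A_eq_ofList]
  unfold find_set_duplicates_subset_alt
  rw [pvScan_eq]
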